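-- pv_equiv track=rewrite | github.com/hungson175/deep-research-langchain | src/agents/base_ceo_agent.py | _simple_extract_items
-- ===== SOURCE A (Python) =====
-- from typing import List, Optional, Any
--
-- def _simple_extract_items(response_content: str, prefixes: List[str]) -> List[str]:
--     """Simple fallback method to extract items from text.
--
--     Args:
--         response_content: Raw text content
--         prefixes: List of prefixes to look for (e.g., ['1.', '2.', '##'])
--
--     Returns:
--         List of extracted items
--     """
--     lines = response_content.split('\n')
--     items = []
--     current_item = []
--
--     for line in lines:
--         line_stripped = line.strip()
--         # Look for item boundaries
--         if line_stripped and any(line_stripped.startswith(prefix) for prefix in prefixes):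
--             if current_item:
--                 items.append('\n'.join(current_item))
--                 current_item = []
--             current_item.append(line)
--         elif current_item:
--             current_item.append(line)
--
--     # Add last item
--     if current_item:
--         items.append('\n'.join(current_item))
--
--     return items if items else [response_content]
-- ===== SOURCE B (Python) =====
-- def _simple_extract_items(response_content, prefixes):
--     """Staged passes: first collect the indices of marker lines, then cut the
--     line list at those boundaries and join each slice; fall back to the whole
--     text when no marker is found."""
--     lines = response_content.split('\n')
--     bounds = [i for i, line in enumerate(lines)
--               if line.strip() and any(line.strip().startswith(p) for p in prefixes)]
--     if not bounds:
--         return [response_content]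
--     return ['\n'.join(lines[s:e]) for s, e in zip(bounds, bounds[1:] + [len(lines)])]
-- ===== Notes on version B (the rewrite author's own statement) =====
-- stated objective: alternative
-- what changed: Replaces A's single forward scan with flush-on-boundary accumulator state by staged passes: first compute the list of marker-line indices, then produce each item by slicing the line list between consecutive boundaries (last slice to len(lines)) and joining.
import Mathlib
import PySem

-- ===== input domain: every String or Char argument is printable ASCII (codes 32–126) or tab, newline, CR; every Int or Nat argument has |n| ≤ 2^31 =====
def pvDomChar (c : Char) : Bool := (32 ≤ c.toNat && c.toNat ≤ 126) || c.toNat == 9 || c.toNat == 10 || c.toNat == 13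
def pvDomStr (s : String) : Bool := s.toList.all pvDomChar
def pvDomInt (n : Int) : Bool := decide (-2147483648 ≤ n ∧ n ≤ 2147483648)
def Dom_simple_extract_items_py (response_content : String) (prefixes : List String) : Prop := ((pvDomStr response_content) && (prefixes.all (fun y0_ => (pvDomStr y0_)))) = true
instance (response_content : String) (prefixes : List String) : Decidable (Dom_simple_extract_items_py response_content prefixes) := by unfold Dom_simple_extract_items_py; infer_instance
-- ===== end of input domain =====

-- B replaces A's forward flush-on-boundary accumulation with staged passes:
-- collect marker-line indices, then slice the line list between consecutive
-- boundaries and join each slice (objective: alternative decomposition, same cost).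

-- marker test shared by both programs: stripped line is non-empty and starts with some prefix
def pvIsMarker (prefixes : List String) (line : String) : Bool :=
  let s := PySem.Str.strip line
  (!(s == "")) && prefixes.any (fun p => PySem.Str.startswith s p)

-- ===== PORT A =====
-- loop body of A: state = (items, current_item)
def pvStepA (prefixes : List String) (st : List String × List String) (line : String) :
    List String × List String :=
  if pvIsMarker prefixes line then
    if st.2 ≠ [] then (st.1 ++ [PySem.Str.join "\n" st.2], [line]) else (st.1, [line])
  else if st.2 ≠ [] then (st.1, st.2 ++ [line]) else st

def simple_extract_items_py (response_content : String) (prefixes : List String) : List String :=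
  -- s.split("\n"): sep is the non-empty literal "\n", so split? always returns some; the getD default is unreachable
  let lines := (PySem.Str.split? response_content "\n").getD []
  let st := lines.foldl (pvStepA prefixes) ([], [])
  -- add last item
  let items := if st.2 ≠ [] then st.1 ++ [PySem.Str.join "\n" st.2] else st.1
  if items ≠ [] then items else [response_content]

-- ===== PORT B =====
def simple_extract_items_py_alt (response_content : String) (prefixes : List String) : List String :=
  -- s.split("\n"): sep is the non-empty literal "\n", so split? always returns some; the getD default is unreachable
  let lines := (PySem.Str.split? response_content "\n").getD []
  -- bounds = [i for i, line in enumerate(lines) if <marker test>]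
  let bounds := ((PySem.List.enumerate lines).filter
      (fun il => pvIsMarker prefixes il.2)).map (fun il => il.1)
  if bounds = [] then [response_content]
  else
    ((bounds.zip (bounds.tail ++ [(lines.length : Int)])).map
      (fun se => PySem.Str.join "\n" (PySem.List.slice lines (some se.1) (some se.2))))

-- ===== PRECONDITION & SPEC =====
def Spec_simple_extract_items_py (response_content : String) (prefixes : List String) (out : List String) : Prop := out = simple_extract_items_py_alt response_content prefixes
instance (response_content : String) (prefixes : List String) (out : List String) : Decidable (Spec_simple_extract_items_py response_content prefixes out) := by unfold Spec_simple_extract_items_py; infer_instance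

-- ===== CLAIM (what is proved, stated in full; the proofs are below) =====
def Claim_equal_simple_extract_items_py : Prop := ∀ (response_content : String) (prefixes : List String), Dom_simple_extract_items_py response_content prefixes → Spec_simple_extract_items_py response_content prefixes (simple_extract_items_py response_content prefixes)

-- ===== LEMMAS AND PROOFS =====

-- canonical grouping: drop lines before the first marker; each group is a marker
-- line together with the following non-marker lines
def pvG (p : String → Bool) : List String → List (List String)
  | [] => []
  | l :: ls =>
    if p l then (l :: ls.takeWhile (fun x => !p x)) :: pvG p (ls.dropWhile (fun x => !p x))
    else pvG p ls
termination_by ls => ls.length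
decreasing_by
  · exact Nat.lt_succ_of_le (List.length_dropWhile_le _ _)
  · exact Nat.lt_succ_of_le (Nat.le_refl _)

theorem pvG_dropWhile (p : String → Bool) (ls : List String) :
    pvG p (ls.dropWhile (fun x => !p x)) = pvG p ls := by
  induction ls with
  | nil => rfl
  | cons l ls ih =>
    by_cases h : p l = true
    · simp [h]
    · simp only [Bool.not_eq_true] at h
      simp [h, ih, pvG]

-- Nat-valued marker indices
def pvIdx (p : String → Bool) : List String → List Nat
  | [] => []
  | l :: ls => if p l then 0 :: (pvIdx p ls).map (· + 1) else (pvIdx p ls).map (· + 1)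

-- B's enumerate/filter/map pass computes the cast marker indices
theorem pvEnum_eq_idx (p : String → Bool) (ls : List String) (s : Int) :
    ((PySem.List.enumerate ls s).filter (fun il => p il.2)).map (fun il => il.1) =
      (pvIdx p ls).map (fun n : Nat => s + (n : Int)) := by
  induction ls generalizing s with
  | nil => simp [PySem.List.enumerate_nil, pvIdx]
  | cons l ls ih =>
    rw [PySem.List.enumerate_cons]
    by_cases h : p l = true
    · rw [List.filter_cons_of_pos (by simpa using h),
        show pvIdx p (l :: ls) = 0 :: (pvIdx p ls).map (· + 1) by simp [pvIdx, h],
        List.map_cons, List.map_cons, ih, List.map_map]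
      refine congrArg₂ _ (by simp) (List.map_congr_left ?_)
      intro n _
      simp only [Function.comp_apply]
      push_cast
      ring
    · simp only [Bool.not_eq_true] at h
      rw [List.filter_cons_of_neg (by simp [h]),
        show pvIdx p (l :: ls) = (pvIdx p ls).map (· + 1) by simp [pvIdx, h],
        ih, List.map_map]
      refine List.map_congr_left ?_
      intro n _
      simp only [Function.comp_apply]
      push_cast
      ring

-- slices between consecutive Nat boundaries, on the drop/take level
def pvSlices (bs : List Nat) (len : Nat) (ls : List String) : List (List String) :=
  (bs.zip (bs.tail ++ [len])).map (fun se => (ls.drop se.1).take (se.2 - se.1))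

-- shifting every boundary by one and consing a line leaves the slices unchanged
theorem pvSlices_shift (bs : List Nat) (ls : List String) (l : String) :
    pvSlices (bs.map (· + 1)) (ls.length + 1) (l :: ls) = pvSlices bs ls.length ls := by
  unfold pvSlices
  have ht : (bs.map (· + 1)).tail ++ [ls.length + 1] =
      (bs.tail ++ [ls.length]).map (· + 1) := by
    cases bs <;> simp
  rw [ht, List.zip_map, List.map_map]
  apply List.map_congr_left
  intro se _
  simp [Nat.succ_sub_succ]

-- the first marker index (or the length) cuts the list at takeWhile
theorem pvIdx_headD_take (p : String → Bool) (ls : List String) :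
    ls.take ((pvIdx p ls).head?.getD ls.length) = ls.takeWhile (fun x => !p x) := by
  induction ls with
  | nil => simp
  | cons l ls ih =>
    by_cases h : p l = true
    · simp [pvIdx, h]
    · simp only [Bool.not_eq_true] at h
      cases hpi : pvIdx p ls with
      | nil => simpa [pvIdx, h, hpi] using congrArg (l :: ·) (by simpa [hpi] using ih)
      | cons b bs => simpa [pvIdx, h, hpi] using congrArg (l :: ·) (by simpa [hpi] using ih)

-- main characterisation: boundary slicing computes the canonical groups
theorem pvSlices_eq_G (p : String → Bool) (ls : List String) :
    pvSlices (pvIdx p ls) ls.length ls = pvG p ls := by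
  induction ls with
  | nil => simp [pvSlices, pvIdx, pvG]
  | cons l ls ih =>
    by_cases h : p l = true
    · have hzip : (0 :: (pvIdx p ls).map (· + 1)).zip
          ((pvIdx p ls).map (· + 1) ++ [ls.length + 1]) =
            (0, (pvIdx p ls).head?.getD ls.length + 1) ::
              ((pvIdx p ls).map (· + 1)).zip
                (((pvIdx p ls).map (· + 1)).tail ++ [ls.length + 1]) := by
        cases pvIdx p ls <;> simp [List.zip_cons_cons]
      calc pvSlices (pvIdx p (l :: ls)) (l :: ls).length (l :: ls)
          = ((l :: ls).take ((pvIdx p ls).head?.getD ls.length + 1)) ::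
              pvSlices ((pvIdx p ls).map (· + 1)) (ls.length + 1) (l :: ls) := by
            simp only [pvIdx, h, if_pos, pvSlices, List.length_cons, List.tail_cons]
            rw [hzip]
            simp
        _ = (l :: ls.takeWhile (fun x => !p x)) :: pvG p ls := by
            rw [List.take_succ_cons, pvIdx_headD_take p ls, pvSlices_shift, ih]
        _ = pvG p (l :: ls) := by
            rw [pvG]; simp [h, pvG_dropWhile]
    · simp only [Bool.not_eq_true] at h
      rw [show pvIdx p (l :: ls) = (pvIdx p ls).map (· + 1) by simp [pvIdx, h],
        show (l :: ls).length = ls.length + 1 from rfl, pvSlices_shift, ih,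
        show pvG p (l :: ls) = pvG p ls by rw [pvG]; simp [h]]

-- A's loop followed by the final flush computes the joined canonical groups
theorem pvA_foldl_eq_G (prefixes : List String) (ls : List String)
    (items cur : List String) :
    (let st := ls.foldl (pvStepA prefixes) (items, cur)
     if st.2 ≠ [] then st.1 ++ [PySem.Str.join "\n" st.2] else st.1) =
      items ++
        (if cur = [] then (pvG (pvIsMarker prefixes) ls).map (PySem.Str.join "\n")
         else PySem.Str.join "\n" (cur ++ ls.takeWhile (fun x => !pvIsMarker prefixes x)) ::
           (pvG (pvIsMarker prefixes) (ls.dropWhile (fun x => !pvIsMarker prefixes x))).map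
             (PySem.Str.join "\n")) := by
  induction ls generalizing items cur with
  | nil =>
    by_cases hc : cur = []
    · simp [hc, pvG]
    · simp [hc, pvG]
  | cons l ls ih =>
    simp only [List.foldl_cons]
    by_cases h : pvIsMarker prefixes l = true
    · by_cases hc : cur = []
      · rw [show pvStepA prefixes (items, cur) l = (items, [l]) by simp [pvStepA, h, hc]]
        rw [ih]
        simp [hc, pvG, h]
      · rw [show pvStepA prefixes (items, cur) l =
            (items ++ [PySem.Str.join "\n" cur], [l]) by simp [pvStepA, h, hc]]
        rw [ih]
        simp [hc, pvG, h]
    · simp only [Bool.not_eq_true] at h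
      by_cases hc : cur = []
      · rw [show pvStepA prefixes (items, cur) l = (items, cur) by simp [pvStepA, h, hc]]
        rw [ih]
        simp [hc, pvG, h]
      · rw [show pvStepA prefixes (items, cur) l = (items, cur ++ [l]) by
            simp [pvStepA, h, hc]]
        rw [ih]
        simp [hc, h]

-- ===== VERDICT (by name: the statement is the Claim_ definition above) =====
theorem simple_extract_items_py_spec : Claim_equal_simple_extract_items_py := by
  intro rc prefixes _
  unfold Spec_simple_extract_items_py
  simp only [simple_extract_items_py, simple_extract_items_py_alt]
  set ls := (PySem.Str.split? rc "\n").getD [] with hls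
  have hA := pvA_foldl_eq_G prefixes ls [] []
  simp only [List.nil_append, if_true] at hA
  rw [hA, pvEnum_eq_idx (pvIsMarker prefixes) ls 0]
  simp only [zero_add]
  set idx := pvIdx (pvIsMarker prefixes) ls with hidx
  by_cases hi : idx = []
  · have hG : pvG (pvIsMarker prefixes) ls = [] := by
      rw [← pvSlices_eq_G, ← hidx, hi]; simp [pvSlices]
    simp [hi, hG]
  · have hne : idx.map (fun n : Nat => (n : Int)) ≠ [] := by simpa using hi
    rw [if_neg hne]
    have hG : pvG (pvIsMarker prefixes) ls ≠ [] := by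
      rw [← pvSlices_eq_G, ← hidx]
      unfold pvSlices
      cases hidx' : idx with
      | nil => exact absurd hidx' hi
      | cons b bs => simp
    rw [if_pos (by simpa using hG)]
    -- both sides are the joined canonical groups
    rw [← pvSlices_eq_G, ← hidx]
    unfold pvSlices
    have ht : (idx.map (fun n : Nat => (n : Int))).tail ++ [(ls.length : Int)] =
        (idx.tail ++ [ls.length]).map (fun n : Nat => (n : Int)) := by
      cases idx <;> simp
    rw [ht, List.zip_map, List.map_map, List.map_map]
    apply List.map_congr_left
    intro se _
    simp [Function.comp, Prod.map, PySem.List.slice_natCast]
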